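-- pv_equiv track=rewrite | github.com/ibolorino/biohazard | functions.py | get_all_solutions
-- ===== SOURCE A (Python) =====
-- def get_all_solutions(max_samples):
--     solution = []
--     all_solutions = []
--     for k in range(1, max_samples+1):
--         for i in range(k, max_samples+1):
--             solution.clear()
--             for j in range (k, i+1):
--                 solution.append(j)
--                 #print ("(%s, %s)" %(i,j))
--             all_solutions.append(list(solution))
--     return all_solutions
-- ===== SOURCE B (Python) =====
-- def get_all_solutions(max_samples):
--     all_solutions = []
--     for k in range(1, max_samples + 1):
--         r = list(range(k, max_samples + 1))
--         for m in range(1, len(r) + 1):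
--             all_solutions.append(r[:m])
--     return all_solutions
-- ===== Notes on version B (the rewrite author's own statement) =====
-- stated objective: alternative
-- what changed: Instead of re-running an inner loop that rebuilds each range element by element for every (k,i), B materialises the full range [k..max] once per k and emits its prefixes by slicing r[:m].
import Mathlib
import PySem

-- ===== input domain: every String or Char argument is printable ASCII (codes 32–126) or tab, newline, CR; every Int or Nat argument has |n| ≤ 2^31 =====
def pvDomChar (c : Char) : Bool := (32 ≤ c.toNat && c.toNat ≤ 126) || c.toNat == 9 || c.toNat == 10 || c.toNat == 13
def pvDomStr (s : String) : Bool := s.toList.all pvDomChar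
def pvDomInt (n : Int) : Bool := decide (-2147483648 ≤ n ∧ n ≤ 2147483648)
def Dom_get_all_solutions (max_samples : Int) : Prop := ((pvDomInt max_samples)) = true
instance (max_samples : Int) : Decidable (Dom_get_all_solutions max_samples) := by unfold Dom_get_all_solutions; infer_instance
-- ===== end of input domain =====

-- B materialises the range [k..max] once per k and emits its prefixes by slicing, instead of rebuilding each range element by element.

-- ===== PORT A =====
-- state: (solution, all_solutions); solution.clear() = the [] that starts the j-fold,
-- and the j-fold's result is stored back as the carried 'solution'.
def get_all_solutions (max_samples : Int) : List (List Int) :=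
  ((PySem.List.pyRange 1 (max_samples + 1) 1).foldl
    (fun (st : List Int × List (List Int)) k =>
      (PySem.List.pyRange k (max_samples + 1) 1).foldl
        (fun (st : List Int × List (List Int)) i =>
          let solution := (PySem.List.pyRange k (i + 1) 1).foldl (fun s j => s ++ [j]) []
          (solution, st.2 ++ [solution])) st) (([] : List Int), ([] : List (List Int)))).2

-- ===== PORT B =====
-- per k: r = list(range(k, max_samples+1)); append the slice r[:m] for m in range(1, len(r)+1).
def get_all_solutions_alt (max_samples : Int) : List (List Int) :=
  (PySem.List.pyRange 1 (max_samples + 1) 1).foldl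
    (fun (all : List (List Int)) k =>
      let r := PySem.List.pyRange k (max_samples + 1) 1
      (PySem.List.pyRange 1 ((r.length : Int) + 1) 1).foldl
        (fun all m => all ++ [PySem.List.slice r none (some m)]) all) []

-- ===== PRECONDITION & SPEC =====
def Spec_get_all_solutions (max_samples : Int) (out : List (List Int)) : Prop := out = get_all_solutions_alt max_samples
instance (max_samples : Int) (out : List (List Int)) : Decidable (Spec_get_all_solutions max_samples out) := by unfold Spec_get_all_solutions; infer_instance

-- ===== CLAIM =====
def Claim_equal_get_all_solutions : Prop := ∀ (max_samples : Int), Dom_get_all_solutions max_samples → Spec_get_all_solutions max_samples (get_all_solutions max_samples)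

-- ===== LEMMAS AND PROOFS =====

-- a fold that appends f x for each x builds init ++ l.map f
theorem foldl_snoc_map {α β : Type} (f : α → β) (l : List α) (init : List β) :
    l.foldl (fun acc x => acc ++ [f x]) init = init ++ l.map f := by
  induction l generalizing init with
  | nil => simp
  | cons x xs ih => simp [List.foldl, ih]

-- append-fold builds init ++ l
theorem foldl_snoc (l : List Int) (init : List Int) :
    l.foldl (fun s j => s ++ [j]) init = init ++ l := by
  induction l generalizing init with
  | nil => simp
  | cons x xs ih => simp [List.foldl, ih]

-- A's inner loop appends, for each i of L, the full range pyRange k (i+1) 1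
theorem a_inner (k : Int) (L : List Int) (sol : List Int) (all : List (List Int)) :
    (L.foldl (fun (st : List Int × List (List Int)) i =>
        let solution := (PySem.List.pyRange k (i + 1) 1).foldl (fun s j => s ++ [j]) []
        (solution, st.2 ++ [solution])) (sol, all)).2
      = all ++ L.map (fun i => PySem.List.pyRange k (i + 1) 1) := by
  induction L generalizing sol all with
  | nil => simp
  | cons x xs ih =>
    simp only [List.foldl_cons]
    exact (ih ((PySem.List.pyRange k (x + 1) 1).foldl (fun s j => s ++ [j]) [])
        (all ++ [(PySem.List.pyRange k (x + 1) 1).foldl (fun s j => s ++ [j]) []])).trans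
      (by rw [foldl_snoc]; simp)

-- taking t elements of range(a, b) is range(a, a+t), for t within the range's length
theorem take_pyRange (a b : Int) (t : Nat) (h : t ≤ (b - a).toNat) :
    (PySem.List.pyRange a b 1).take t = PySem.List.pyRange a (a + (t : Int)) 1 := by
  rw [PySem.List.pyRange_one a b, PySem.List.pyRange_one a (a + (t : Int)),
      show (a + (t : Int) - a).toNat = t by omega,
      ← List.map_take, List.take_range, Nat.min_eq_left h]

-- the ranges A rebuilds per i are exactly the prefixes B slices off r
theorem inner_eq (k n : Int) :
    (PySem.List.pyRange k (n + 1) 1).map (fun i => PySem.List.pyRange k (i + 1) 1)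
      = (PySem.List.pyRange 1 (((PySem.List.pyRange k (n + 1) 1).length : Int) + 1) 1).map
          (fun m => PySem.List.slice (PySem.List.pyRange k (n + 1) 1) none (some m)) := by
  rw [PySem.List.length_pyRange_one]
  set len : Nat := (n + 1 - k).toNat with hlen
  have hL : (PySem.List.pyRange k (n + 1) 1).map (fun i => PySem.List.pyRange k (i + 1) 1)
      = (List.range len).map (fun (j : Nat) => PySem.List.pyRange k (k + (j : Int) + 1) 1) := by
    rw [PySem.List.pyRange_one k (n + 1), List.map_map,
        show ((n : Int) + 1 - k).toNat = len by omega]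
    apply List.map_congr_left
    intro j _
    simp [Function.comp]
  have hR : (PySem.List.pyRange 1 ((len : Int) + 1) 1).map
        (fun m => PySem.List.slice (PySem.List.pyRange k (n + 1) 1) none (some m))
      = (List.range len).map (fun (j : Nat) => PySem.List.pyRange k (k + (j : Int) + 1) 1) := by
    rw [PySem.List.pyRange_one 1 ((len : Int) + 1), List.map_map,
        show (((len : Int) + 1 - 1)).toNat = len by omega]
    apply List.map_congr_left
    intro j hj
    have hjlt : j < len := List.mem_range.mp hj
    simp only [Function.comp]
    rw [PySem.List.slice_to _ (by omega : (0:Int) ≤ 1 + (j:Int)),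
        show ((1 : Int) + (j : Int)).toNat = j + 1 by omega,
        take_pyRange k (n + 1) (j + 1) (by omega)]
    congr 1
    push_cast
    ring
  rw [hL, hR]

theorem get_all_solutions_spec : Claim_equal_get_all_solutions := by
  intro m _
  unfold Spec_get_all_solutions get_all_solutions get_all_solutions_alt
  have main : ∀ (L : List Int) (sol : List Int) (all : List (List Int)),
      (L.foldl (fun (st : List Int × List (List Int)) k =>
          (PySem.List.pyRange k (m + 1) 1).foldl
            (fun (st : List Int × List (List Int)) i =>
              let solution := (PySem.List.pyRange k (i + 1) 1).foldl (fun s j => s ++ [j]) []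
              (solution, st.2 ++ [solution])) st) (sol, all)).2
        = L.foldl (fun (all : List (List Int)) k =>
            let r := PySem.List.pyRange k (m + 1) 1
            (PySem.List.pyRange 1 ((r.length : Int) + 1) 1).foldl
              (fun all mm => all ++ [PySem.List.slice r none (some mm)]) all) all := by
    intro L
    induction L with
    | nil => intro sol all; simp
    | cons x xs ih =>
      intro sol all
      simp only [List.foldl]
      have hA := a_inner x (PySem.List.pyRange x (m + 1) 1) sol all
      rw [show ((PySem.List.pyRange x (m + 1) 1).foldl
          (fun (st : List Int × List (List Int)) i =>
            let solution := (PySem.List.pyRange x (i + 1) 1).foldl (fun s j => s ++ [j]) []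
            (solution, st.2 ++ [solution])) (sol, all))
          = (((PySem.List.pyRange x (m + 1) 1).foldl
              (fun (st : List Int × List (List Int)) i =>
                let solution := (PySem.List.pyRange x (i + 1) 1).foldl (fun s j => s ++ [j]) []
                (solution, st.2 ++ [solution])) (sol, all)).1,
             all ++ (PySem.List.pyRange x (m + 1) 1).map
               (fun i => PySem.List.pyRange x (i + 1) 1)) from
        Prod.ext rfl hA]
      rw [ih]
      congr 1
      rw [foldl_snoc_map, inner_eq x m]
  exact main (PySem.List.pyRange 1 (m + 1) 1) [] []
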